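-- pv_equiv track=rewrite | github.com/dpebert7/TIdy | TI.py | char_is_in_string
-- ===== SOURCE A (Python) =====
-- def char_is_in_string(lst, line_idx, char_idx):
--     """
--     Determine if a given character (referenced by index) is part of a string. E
--         E.g. logx = '\\s-grp-dbsvr6\sqlpackagedata$\TM1\Working\test.txt'; should return True for all \,
--         but nResult = nNumerator \ nDenominator; should return False for \
--     Since strings can go over multiple lines, look back to previous semicolon (if exists?) for start of strings
--     """
--     # Loop backward to find first semicolon
--     idx = line_idx
--     start_idx = 0
--     while idx > 0:
--         if ";" in lst[idx]:
--             # Assume ";" is the last character of previous line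
--             start_idx = idx
--             idx = 0
--         elif idx == 1:
--             start_idx = 0
--         idx = idx - 1
--
--     # Create single string from start_idx to line_idx, then append current line
--     longstr = "".join(lst[start_idx:line_idx])
--     longstr += (lst[line_idx][:char_idx + 1])
--
--     # Count the number of occurrences of '
--     count = longstr.count("'")
--     if count % 2 == 0:
--         return False
--     return True
-- ===== SOURCE B (Python) =====
-- def char_is_in_string(lst, line_idx, char_idx):
--     # Character-level automaton: walk forward from line 0 toggling an in-string
--     # flag on each quote; a semicolon line (past line 0) resets the flag.
--     in_str = False
--     for s in range(line_idx):
--         if s >= 1 and ";" in lst[s]: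
--             in_str = False
--         for ch in lst[s]:
--             if ch == "'":
--                 in_str = not in_str
--     if line_idx >= 1 and ";" in lst[line_idx]:
--         in_str = False
--     for ch in lst[line_idx][:char_idx + 1]:
--         if ch == "'":
--             in_str = not in_str
--     return in_str
-- ===== Notes on version B (the rewrite author's own statement) =====
-- stated objective: alternative
-- what changed: Replaced A's backward semicolon search followed by join-the-lines-then-count-quotes-then-parity with a single forward character-level automaton that toggles an in-string flag on each quote and resets it on semicolon lines, so no start index, no concatenated string and no count are ever computed.
-- outside the precondition, e.g. on char_is_in_string(["'a", 'b;', "c'"], -1, 0): A returns True, B returns False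
import Mathlib
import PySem

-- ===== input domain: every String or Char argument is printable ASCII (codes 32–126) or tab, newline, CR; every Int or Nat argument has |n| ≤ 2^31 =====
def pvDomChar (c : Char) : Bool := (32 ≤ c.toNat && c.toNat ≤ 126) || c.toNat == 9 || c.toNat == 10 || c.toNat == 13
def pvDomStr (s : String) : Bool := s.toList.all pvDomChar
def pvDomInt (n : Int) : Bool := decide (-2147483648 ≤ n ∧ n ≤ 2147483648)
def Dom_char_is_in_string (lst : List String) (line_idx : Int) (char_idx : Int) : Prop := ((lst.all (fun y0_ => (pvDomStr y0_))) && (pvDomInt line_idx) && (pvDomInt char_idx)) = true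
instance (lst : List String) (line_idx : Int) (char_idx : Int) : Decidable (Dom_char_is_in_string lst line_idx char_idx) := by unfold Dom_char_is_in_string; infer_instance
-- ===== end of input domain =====

-- B replaces A's backward semicolon search + join-then-count-then-parity by a forward
-- character-level automaton that toggles an in-string flag on quotes and resets it on
-- semicolon lines: objective 'alternative'.

-- ===== PORT A =====
-- the 'while idx > 0' backward loop of A, state (idx, start_idx)
def charLoopA (lst : List String) (idx start_idx : Int) : Int :=
  if 0 < idx then
    if PySem.Str.isIn ";" ((PySem.List.pyGet? lst idx).getD "") then
      -- start_idx = idx; idx = 0; then idx = idx - 1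
      charLoopA lst (0 - 1) idx
    else if idx == 1 then
      charLoopA lst (idx - 1) 0
    else
      charLoopA lst (idx - 1) start_idx
  else start_idx
termination_by idx.toNat
decreasing_by all_goals omega

def char_is_in_string (lst : List String) (line_idx : Int) (char_idx : Int) : Bool :=
  let start_idx := charLoopA lst line_idx 0
  let longstr := PySem.Str.join "" (PySem.List.slice lst (some start_idx) (some line_idx))
  let longstr2 := longstr ++ PySem.Str.slice ((PySem.List.pyGet? lst line_idx).getD "") none (some (char_idx + 1))
  let count := PySem.Str.count longstr2 "'"
  if count % 2 == 0 then false else true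

-- ===== PORT B =====
-- the inner "for ch in …: if ch == \"'\": in_str = not in_str" loop of Source B
def toggleQuotes (cs : List Char) (b : Bool) : Bool :=
  cs.foldl (fun b ch => if ch == '\'' then !b else b) b

def char_is_in_string_alt (lst : List String) (line_idx : Int) (char_idx : Int) : Bool :=
  let in1 := (PySem.List.pyRange 0 line_idx).foldl
    (fun inS s =>
      let inS := if decide (1 ≤ s) && PySem.Str.isIn ";" ((PySem.List.pyGet? lst s).getD "") then false else inS
      toggleQuotes ((PySem.List.pyGet? lst s).getD "").toList inS) false
  let in2 := if decide (1 ≤ line_idx) && PySem.Str.isIn ";" ((PySem.List.pyGet? lst line_idx).getD "") then false else in1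
  toggleQuotes (PySem.Str.slice ((PySem.List.pyGet? lst line_idx).getD "") none (some (char_idx + 1))).toList in2

-- ===== PRECONDITION & SPEC =====
-- Pre_ restricts to the natural domain 0 ≤ line_idx < len(lst): a negative in-range
-- line_idx makes A return a value via negative-index wraparound while silently skipping
-- the semicolon search, an accident of A's implementation outside the task's natural
-- domain of line numbers (out-of-range indices make A raise IndexError).
def Pre_char_is_in_string (lst : List String) (line_idx : Int) (char_idx : Int) : Prop :=
  0 ≤ line_idx ∧ line_idx < lst.length
instance (lst : List String) (line_idx : Int) (char_idx : Int) : Decidable (Pre_char_is_in_string lst line_idx char_idx) := by unfold Pre_char_is_in_string; infer_instance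

def pvWitness_char_is_in_string : List String × Int × Int := (["a'b;", "x'y"], 1, 1)

def Spec_char_is_in_string (lst : List String) (line_idx : Int) (char_idx : Int) (out : Bool) : Prop := out = char_is_in_string_alt lst line_idx char_idx
instance (lst : List String) (line_idx : Int) (char_idx : Int) (out : Bool) : Decidable (Spec_char_is_in_string lst line_idx char_idx out) := by unfold Spec_char_is_in_string; infer_instance

-- ===== CLAIM (what is proved, stated in full; the proofs are below) =====
def Claim_equal_char_is_in_string : Prop := ∀ (lst : List String) (line_idx : Int) (char_idx : Int), Dom_char_is_in_string lst line_idx char_idx → Pre_char_is_in_string lst line_idx char_idx → Spec_char_is_in_string lst line_idx char_idx (char_is_in_string lst line_idx char_idx)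

-- ===== LEMMAS AND PROOFS =====

-- Python str.count with a single-character needle is List.count
lemma countGo_single (c : Char) : ∀ (s : List Char) (fuel acc : Nat), s.length ≤ fuel →
    PySem.Chars.count.go [c] fuel s acc = acc + s.count c := by
  intro s
  induction s with
  | nil => intro fuel acc h; cases fuel <;> simp [PySem.Chars.count.go]
  | cons h t ih =>
    intro fuel acc hl
    cases fuel with
    | zero => simp at hl
    | succ f =>
      rw [PySem.Chars.count.go]
      simp only [List.length_singleton, List.drop_one, List.tail_cons]
      by_cases hc : h = c
      · subst hc
        rw [if_pos (by simp [List.isPrefixOf])]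
        rw [ih f (acc + 1) (by simp at hl; omega)]
        simp
        omega
      · rw [if_neg (by simp [List.isPrefixOf]; exact fun e => hc (Eq.symm e))]
        rw [ih f acc (by simp at hl; omega)]
        rw [List.count_cons_of_ne hc]

lemma count_single (s : List Char) (c : Char) :
    PySem.Chars.count s [c] = s.count c := by
  unfold PySem.Chars.count
  simpa using countGo_single c s s.length 0 le_rfl

lemma strCount_quote (s : String) : PySem.Str.count s "'" = s.toList.count '\'' := by
  rw [PySem.Str.count_eq]
  exact count_single s.toList '\''

-- "".join(parts) is the flat concatenation
lemma join_empty_sep (L : List (List Char)) : PySem.Chars.join [] L = L.flatten := by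
  show (List.intersperse ([] : List Char) L).flatten = L.flatten
  induction L with
  | nil => rfl
  | cons x xs ih => cases xs <;> simp_all [List.intersperse]

-- quotes in a region, as a Nat
def quotesIn (L : List String) : Nat := (L.map (fun s => s.toList.count '\'')).sum

-- the forward last-semicolon fold (B's start line, also reached by A's loop)
def spFold (lst : List String) (b : Int) : Int :=
  (PySem.List.pyRange 1 b).foldl
    (fun st s => if PySem.Str.isIn ";" ((PySem.List.pyGet? lst s).getD "") then s else st) 0

-- A's backward semicolon search computes spFold over range(1, n+1)
lemma loopA_eq_fold (lst : List String) : ∀ (n : Nat),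
    charLoopA lst (n : Int) 0 = spFold lst ((n : Int) + 1) := by
  intro n
  induction n with
  | zero =>
    rw [charLoopA, spFold, PySem.List.pyRange_one_eq_nil (by omega)]
    simp
  | succ m ih =>
    rw [spFold, show ((m + 1 : Nat) : Int) + 1 = ((m : Int) + 1) + 1 by push_cast; ring,
      PySem.List.pyRange_one_succ_right (by omega), List.foldl_append]
    simp only [List.foldl_cons, List.foldl_nil]
    rw [charLoopA]
    rw [if_pos (by omega)]
    rw [show ((m + 1 : Nat) : Int) = (m : Int) + 1 by push_cast; ring]
    by_cases hsemi : PySem.Str.isIn ";" ((PySem.List.pyGet? lst ((m : Int) + 1)).getD "") = true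
    · rw [if_pos hsemi, if_pos hsemi, charLoopA, if_neg (by omega)]
    · rw [if_neg hsemi, if_neg hsemi, ← spFold, ← ih]
      by_cases hm : (m : Int) + 1 == 1
      · rw [if_pos hm]
        have : (m : Int) = 0 := by simpa using hm
        rw [show (m : Int) + 1 - 1 = (m : Int) by ring, this]
      · rw [if_neg hm, show (m : Int) + 1 - 1 = (m : Int) by ring]

lemma spFold_succ (lst : List String) (n : Nat) :
    spFold lst ((n : Int) + 1) =
      if 1 ≤ (n : Int) ∧ PySem.Str.isIn ";" ((PySem.List.pyGet? lst (n : Int)).getD "") = true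
      then (n : Int) else spFold lst (n : Int) := by
  by_cases hn : 1 ≤ (n : Int)
  · rw [spFold, PySem.List.pyRange_one_succ_right (by omega), List.foldl_append, ← spFold]
    simp only [List.foldl_cons, List.foldl_nil]
    by_cases hsemi : PySem.Str.isIn ";" ((PySem.List.pyGet? lst (n : Int)).getD "") = true
    · rw [if_pos hsemi, if_pos ⟨hn, hsemi⟩]
    · rw [if_neg hsemi, if_neg (by tauto)]
  · have h0 : (n : Int) = 0 := by omega
    rw [if_neg (by tauto), h0]
    rw [spFold, spFold, PySem.List.pyRange_one_eq_nil (by omega),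
      PySem.List.pyRange_one_eq_nil (by omega)]

lemma spFold_bounds (lst : List String) : ∀ (n : Nat),
    0 ≤ spFold lst (n : Int) ∧ spFold lst (n : Int) < max 1 (n : Int) := by
  intro n
  induction n with
  | zero =>
    rw [spFold, PySem.List.pyRange_one_eq_nil (by omega)]
    simp
  | succ m ih =>
    rw [show ((m + 1 : Nat) : Int) = (m : Int) + 1 by push_cast; ring, spFold_succ]
    split_ifs with h
    · refine ⟨by omega, ?_⟩
      simp only [lt_max_iff]
      omega
    · obtain ⟨h1, h2⟩ := ih
      refine ⟨h1, ?_⟩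
      simp only [lt_max_iff] at h2 ⊢
      omega

-- toggling over a character list is xor with the quote-count parity
lemma toggleQuotes_eq (cs : List Char) : ∀ (b : Bool),
    toggleQuotes cs b = xor b (decide (cs.count '\'' % 2 = 1)) := by
  induction cs with
  | nil => intro b; simp [toggleQuotes]
  | cons c t ih =>
    intro b
    rw [toggleQuotes, List.foldl_cons, ← toggleQuotes, ih]
    by_cases hc : c = '\''
    · subst hc
      simp only [beq_self_eq_true, if_true, List.count_cons_self]
      have : (t.count '\'' + 1) % 2 = 1 ↔ ¬ (t.count '\'' % 2 = 1) := by omega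
      cases b <;> by_cases hp : t.count '\'' % 2 = 1 <;>
        simp_all
    · rw [if_neg (by simpa using hc), List.count_cons_of_ne hc]

-- region parity as a slice from st to n
def regionParity (lst : List String) (st b : Int) : Bool :=
  decide (quotesIn (PySem.List.slice lst (some st) (some b)) % 2 = 1)

lemma quotesIn_append (L M : List String) : quotesIn (L ++ M) = quotesIn L + quotesIn M := by
  simp [quotesIn]

-- slice extension by one line
lemma slice_snoc (lst : List String) (st : Int) (n : Nat) (hst : 0 ≤ st) (hstn : st ≤ (n : Int))
    (hn : n < lst.length) :
    PySem.List.slice lst (some st) (some ((n : Int) + 1)) =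
      PySem.List.slice lst (some st) (some (n : Int)) ++ [(PySem.List.pyGet? lst (n : Int)).getD ""] := by
  obtain ⟨a, rfl⟩ : ∃ a : Nat, st = (a : Int) := ⟨st.toNat, by omega⟩
  rw [show ((n : Int) + 1) = ((n + 1 : Nat) : Int) by push_cast; ring]
  rw [PySem.List.slice_natCast, PySem.List.slice_natCast, PySem.List.pyGet?_natCast]
  have ha : a ≤ n := by exact_mod_cast hstn
  rw [show n + 1 - a = (n - a) + 1 by omega, List.take_add_one]
  congr 1
  rw [List.getElem?_drop, show a + (n - a) = n by omega, List.getElem?_eq_getElem hn]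
  simp

-- parity of a sum from two parities
lemma xor_parity (a b : Nat) :
    xor (decide (a % 2 = 1)) (decide (b % 2 = 1)) = decide ((a + b) % 2 = 1) := by
  by_cases ha : a % 2 = 1 <;> by_cases hb : b % 2 = 1 <;>
    · simp only [ha, hb]
      simp_all
      omega

-- B's line loop computes the region parity from the forward start fold
lemma lineLoop_eq (lst : List String) : ∀ (n : Nat), n ≤ lst.length →
    (PySem.List.pyRange 0 (n : Int)).foldl
      (fun inS s =>
        let inS := if decide (1 ≤ s) && PySem.Str.isIn ";" ((PySem.List.pyGet? lst s).getD "") then false else inS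
        toggleQuotes ((PySem.List.pyGet? lst s).getD "").toList inS) false
    = regionParity lst (spFold lst (n : Int)) (n : Int) := by
  intro n
  induction n with
  | zero =>
    intro _
    rw [PySem.List.pyRange_one_eq_nil (by omega), List.foldl_nil]
    rw [regionParity, spFold, PySem.List.pyRange_one_eq_nil (by omega), List.foldl_nil]
    simp [quotesIn, PySem.List.slice_to]
  | succ m ih =>
    intro hlen
    rw [show ((m + 1 : Nat) : Int) = (m : Int) + 1 by push_cast; ring]
    rw [PySem.List.pyRange_one_succ_right (by omega), List.foldl_append]
    rw [ih (by omega)]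
    simp only [List.foldl_cons, List.foldl_nil]
    rw [spFold_succ]
    by_cases hsemi : 1 ≤ (m : Int) ∧ PySem.Str.isIn ";" ((PySem.List.pyGet? lst (m : Int)).getD "") = true
    · have hc2 : (decide (1 ≤ (m : Int)) && PySem.Str.isIn ";" ((PySem.List.pyGet? lst (m : Int)).getD "")) = true := by
        rw [hsemi.2, Bool.and_true]; exact decide_eq_true hsemi.1
      rw [if_pos hsemi, if_pos hc2]
      rw [toggleQuotes_eq, regionParity]
      rw [slice_snoc lst (m : Int) m (by omega) (by omega) (by omega)]
      rw [show PySem.List.slice lst (some (m : Int)) (some (m : Int)) = [] from by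
        rw [PySem.List.slice_natCast]; simp]
      simp only [List.nil_append, quotesIn, List.map_cons, List.map_nil, List.sum_cons,
        List.sum_nil, Nat.add_zero]
      simp
    · rw [if_neg hsemi]
      have hcond : (decide (1 ≤ (m : Int)) && PySem.Str.isIn ";" ((PySem.List.pyGet? lst (m : Int)).getD "")) = false := by
        by_cases h1 : (1 : Int) ≤ (m : Int)
        · simp only [h1, decide_true, Bool.true_and]
          by_contra hc
          exact hsemi ⟨h1, by simpa using hc⟩
        · simp only [Bool.and_eq_false_iff, decide_eq_false_iff_not]
          left; exact h1
      rw [hcond]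
      simp only [Bool.false_eq_true, if_false]
      rw [toggleQuotes_eq, regionParity, regionParity]
      obtain ⟨hb0, hb1⟩ := spFold_bounds lst m
      rw [slice_snoc lst _ m hb0 (by simp only [lt_max_iff] at hb1; omega) (by omega)]
      rw [quotesIn_append]
      have hone : quotesIn [(PySem.List.pyGet? lst (m : Int)).getD ""] =
          ((PySem.List.pyGet? lst (m : Int)).getD "").toList.count '\'' := by
        simp [quotesIn]
      rw [hone, xor_parity]

-- A's count is the region total plus the prefix count
lemma countA_eq (lst : List String) (st li ci : Int) :
    PySem.Str.count (PySem.Str.join "" (PySem.List.slice lst (some st) (some li)) ++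
        PySem.Str.slice ((PySem.List.pyGet? lst li).getD "") none (some (ci + 1))) "'"
      = quotesIn (PySem.List.slice lst (some st) (some li)) +
        (PySem.Str.slice ((PySem.List.pyGet? lst li).getD "") none (some (ci + 1))).toList.count '\'' := by
  rw [strCount_quote, String.toList_append, List.count_append, PySem.Str.toList_join]
  have h0 : String.toList "" = [] := rfl
  rw [h0, join_empty_sep, List.count_flatten, List.map_map]
  rfl

-- ===== VERDICT (by name: the statement is the Claim_ definition above) =====
theorem char_is_in_string_spec : Claim_equal_char_is_in_string := by
  intro lst line_idx char_idx _hdom hpre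
  obtain ⟨hge, hlt⟩ := hpre
  obtain ⟨n, rfl⟩ : ∃ n : Nat, line_idx = (n : Int) := ⟨line_idx.toNat, by omega⟩
  have hn : n < lst.length := by exact_mod_cast hlt
  unfold Spec_char_is_in_string char_is_in_string char_is_in_string_alt
  simp only []
  rw [loopA_eq_fold lst n, lineLoop_eq lst n hn.le, countA_eq, toggleQuotes_eq, spFold_succ]
  set pref := (PySem.Str.slice ((PySem.List.pyGet? lst (n : Int)).getD "") none (some (char_idx + 1))).toList with hpref
  by_cases hsemi : 1 ≤ (n : Int) ∧ PySem.Str.isIn ";" ((PySem.List.pyGet? lst (n : Int)).getD "") = true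
  · have hc2 : (decide (1 ≤ (n : Int)) && PySem.Str.isIn ";" ((PySem.List.pyGet? lst (n : Int)).getD "")) = true := by
      rw [hsemi.2, Bool.and_true]; exact decide_eq_true hsemi.1
    rw [if_pos hsemi, if_pos hc2]
    have hempty : PySem.List.slice lst (some (n : Int)) (some (n : Int)) = [] := by
      rw [PySem.List.slice_natCast]; simp
    rw [hempty]
    have hq0 : quotesIn ([] : List String) = 0 := rfl
    rw [hq0]
    simp only [Nat.zero_add, Bool.false_xor]
    by_cases hp : pref.count '\'' % 2 = 1
    · rw [if_neg (by simp; omega)]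
      simp [hp]
    · rw [if_pos (by simp; omega)]
      simp [hp]
  · rw [if_neg hsemi]
    have hcond : (decide (1 ≤ (n : Int)) && PySem.Str.isIn ";" ((PySem.List.pyGet? lst (n : Int)).getD "")) = false := by
      by_cases h1 : (1 : Int) ≤ (n : Int)
      · simp only [h1, decide_true, Bool.true_and]
        by_contra hc
        exact hsemi ⟨h1, by simpa using hc⟩
      · simp only [Bool.and_eq_false_iff, decide_eq_false_iff_not]
        left; exact h1
    rw [hcond]
    simp only [Bool.false_eq_true, if_false]
    rw [regionParity, xor_parity]
    by_cases hp : (quotesIn (PySem.List.slice lst (some (spFold lst (n : Int))) (some (n : Int))) + pref.count '\'') % 2 = 1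
    · rw [if_neg (by simp; omega)]
      simp [hp]
    · rw [if_pos (by simp; omega)]
      simp [hp]
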